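-- pv_equiv track=rewrite | github.com/codeiosaur/pdfwiki | src/generate/pages.py | _citation_suffixes
-- ===== SOURCE A (Python) =====
-- def _citation_suffixes(
--     items: list[str],
--     text_to_sources: dict[str, list[str]],
--     source_key_to_note_index: dict[tuple[str, ...], int],
--     start_index: int,
-- ) -> tuple[list[str], list[str], int]:
--     rendered: list[str] = []
--     notes: list[str] = []
--     next_index = start_index
--
--     if not items:
--         return rendered, notes, next_index
--
--     for item in items:
--         source_ids = text_to_sources.get(item, [])
--         source_key = tuple(source_ids)
--
--         if source_key in source_key_to_note_index:
--             note_index = source_key_to_note_index[source_key]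
--         else:
--             note_index = next_index
--             source_key_to_note_index[source_key] = note_index
--             joined_sources = ", ".join(source_ids) if source_ids else "unknown"
--             notes.append(f"[^{note_index}]: chunk={joined_sources}")
--             next_index += 1
--
--         rendered.append(f"{item} [^{note_index}]")
--
--     return rendered, notes, next_index
-- ===== SOURCE B (Python) =====
-- def _citation_suffixes(
--     items: list[str],
--     text_to_sources: dict[str, list[str]],
--     source_key_to_note_index: dict[tuple[str, ...], int],
--     start_index: int,
-- ) -> tuple[list[str], list[str], int]:
--     # Batch formulation: compute each item's source key, collect the fresh keys
--     # (not yet indexed) deduplicated in first-appearance order, number them by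
--     # enumeration from start_index, merge into the shared dict in one update,
--     # then render everything by pure lookup.  No running counter, no per-item
--     # insert-or-skip branch.
--     keys = [tuple(text_to_sources.get(item, [])) for item in items]
--     fresh = list(dict.fromkeys(k for k in keys if k not in source_key_to_note_index))
--     source_key_to_note_index.update((k, start_index + i) for i, k in enumerate(fresh))
--     notes = [
--         "[^{}]: chunk={}".format(start_index + i, ", ".join(k) if k else "unknown")
--         for i, k in enumerate(fresh)
--     ]
--     rendered = [
--         "{} [^{}]".format(item, source_key_to_note_index[k])
--         for item, k in zip(items, keys)
--     ]
--     return rendered, notes, start_index + len(fresh)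
-- ===== Notes on version B (the rewrite author's own statement) =====
-- stated objective: alternative
-- what changed: A's incremental insert-or-skip loop with a running counter is replaced by a batch computation: filter out already-indexed keys, ordered-dedup them once (dict.fromkeys), number them by enumeration from start_index, merge into the dict with a single update, then render every item by pure lookup.
import Mathlib
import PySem

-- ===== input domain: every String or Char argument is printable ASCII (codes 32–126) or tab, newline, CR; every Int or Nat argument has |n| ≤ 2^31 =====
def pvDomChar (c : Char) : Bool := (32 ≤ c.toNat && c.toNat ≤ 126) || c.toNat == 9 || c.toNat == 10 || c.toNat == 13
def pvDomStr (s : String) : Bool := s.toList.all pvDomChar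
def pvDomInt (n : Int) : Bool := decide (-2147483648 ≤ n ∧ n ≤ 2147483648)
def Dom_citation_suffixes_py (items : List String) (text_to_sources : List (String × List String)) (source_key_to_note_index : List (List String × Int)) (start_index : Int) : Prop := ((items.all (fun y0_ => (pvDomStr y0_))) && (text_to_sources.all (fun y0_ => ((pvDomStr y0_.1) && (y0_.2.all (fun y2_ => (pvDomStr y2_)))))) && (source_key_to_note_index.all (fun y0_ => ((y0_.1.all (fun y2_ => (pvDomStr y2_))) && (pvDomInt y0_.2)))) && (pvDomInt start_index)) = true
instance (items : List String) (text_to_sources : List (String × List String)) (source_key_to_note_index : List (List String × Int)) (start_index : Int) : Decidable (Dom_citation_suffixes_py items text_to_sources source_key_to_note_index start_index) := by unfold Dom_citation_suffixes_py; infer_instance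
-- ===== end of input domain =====

-- B replaces A's incremental insert-or-skip loop with a running counter by a batch computation:
-- dedup the not-yet-indexed keys once, number them by enumeration, merge with one dict update,
-- then render by pure lookup. Equivalence is about the RETURN value; the Python mutation of
-- source_key_to_note_index is the same in A and B (same fresh keys, same order, same values).

-- ===== PORT A =====
-- shared f-string formatting (identical literals in both Pythons)
def csNote (source_ids : List String) (ni : Int) : String :=
  "[^" ++ PySem.Int.toStr ni ++ "]: chunk=" ++
    (if source_ids = [] then "unknown" else PySem.Str.join ", " source_ids)

def csRender (item : String) (ni : Int) : String :=
  item ++ " [^" ++ PySem.Int.toStr ni ++ "]"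

-- A's single loop: state = (rendered, notes, dict, next_index)
def csLoopA (tts : PySem.Dict String (List String)) :
    List String → List String × List String × PySem.Dict (List String) Int × Int →
      List String × List String × PySem.Dict (List String) Int × Int
  | [], st => st
  | item :: rest, (rendered, notes, d, next) =>
    let source_ids := (tts.get? item).getD []
    match d.get? source_ids with
    | some ni => csLoopA tts rest (rendered ++ [csRender item ni], notes, d, next)
    | none =>
        csLoopA tts rest
          (rendered ++ [csRender item next], notes ++ [csNote source_ids next],
           d.insert source_ids next, next + 1)

def citation_suffixes_py (items : List String) (text_to_sources : List (String × List String)) (source_key_to_note_index : List (List String × Int)) (start_index : Int) : List String × List String × Int :=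
  if items = [] then ([], [], start_index)
  else
    let (rendered, notes, _, next) :=
      csLoopA (PySem.Dict.mk text_to_sources) items
        ([], [], PySem.Dict.mk source_key_to_note_index, start_index)
    (rendered, notes, next)

-- ===== PORT B =====
def citation_suffixes_py_alt (items : List String) (text_to_sources : List (String × List String)) (source_key_to_note_index : List (List String × Int)) (start_index : Int) : List String × List String × Int :=
  let tts := PySem.Dict.mk text_to_sources
  let d0 := PySem.Dict.mk source_key_to_note_index
  let keys := items.map (fun item => (tts.get? item).getD [])
  -- dict.fromkeys(…) = ordered dedup
  let fresh := PySem.List.dedup (keys.filter (fun k => !(d0.contains k)))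
  -- source_key_to_note_index.update(…): one batch of inserts
  let d := (PySem.List.enumerate fresh).foldl (fun d' ik => d'.insert ik.2 (start_index + ik.1)) d0
  let notes := (PySem.List.enumerate fresh).map (fun ik => csNote ik.2 (start_index + ik.1))
  let rendered := (items.zip keys).map (fun p => csRender p.1 ((d.get? p.2).getD 0))
  (rendered, notes, start_index + fresh.length)

-- ===== PRECONDITION & SPEC =====
def Spec_citation_suffixes_py (items : List String) (text_to_sources : List (String × List String)) (source_key_to_note_index : List (List String × Int)) (start_index : Int) (out : List String × List String × Int) : Prop := out = citation_suffixes_py_alt items text_to_sources source_key_to_note_index start_index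
instance (items : List String) (text_to_sources : List (String × List String)) (source_key_to_note_index : List (List String × Int)) (start_index : Int) (out : List String × List String × Int) : Decidable (Spec_citation_suffixes_py items text_to_sources source_key_to_note_index start_index out) := by unfold Spec_citation_suffixes_py; infer_instance

-- ===== CLAIM (what is proved, stated in full; the proofs are below) =====
def Claim_equal_citation_suffixes_py : Prop := ∀ (items : List String) (text_to_sources : List (String × List String)) (source_key_to_note_index : List (List String × Int)) (start_index : Int), Dom_citation_suffixes_py items text_to_sources source_key_to_note_index start_index → Spec_citation_suffixes_py items text_to_sources source_key_to_note_index start_index (citation_suffixes_py items text_to_sources source_key_to_note_index start_index)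

-- ===== LEMMAS AND PROOFS =====

-- proof-only intermediate: A's loop with the rendering stripped out (dict, notes, counter only)
def csPass1 (tts : PySem.Dict String (List String)) :
    List String → PySem.Dict (List String) Int × List String × Int →
      PySem.Dict (List String) Int × List String × Int
  | [], st => st
  | item :: rest, (d, notes, next) =>
    let source_ids := (tts.get? item).getD []
    match d.get? source_ids with
    | some _ => csPass1 tts rest (d, notes, next)
    | none => csPass1 tts rest (d.insert source_ids next, notes ++ [csNote source_ids next], next + 1)

-- the fresh-key stream of A's loop, relative to the current dict (inserted value irrelevant)
def csFresh (tts : PySem.Dict String (List String)) :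
    PySem.Dict (List String) Int → List String → List (List String)
  | _, [] => []
  | d, item :: rest =>
    let k := (tts.get? item).getD []
    if (d.get? k).isSome then csFresh tts d rest
    else k :: csFresh tts (d.insert k 0) rest

theorem csFresh_congr (tts : PySem.Dict String (List String)) (l : List String)
    (d1 d2 : PySem.Dict (List String) Int)
    (h : ∀ k, (d1.get? k).isSome = (d2.get? k).isSome) :
    csFresh tts d1 l = csFresh tts d2 l := by
  induction l generalizing d1 d2 with
  | nil => rfl
  | cons item rest ih =>
    simp only [csFresh, h]
    split
    · exact ih d1 d2 h
    · rw [ih]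
      intro k
      by_cases hk : k = (tts.get? item).getD []
      · simp [hk]
      · simp [PySem.Dict.get?_insert, hk, h k]

-- pass 1 never overwrites an existing key, so lookups are preserved to the final dict
theorem csPass1_mono (tts : PySem.Dict String (List String)) (items : List String)
    (d : PySem.Dict (List String) Int) (n : List String) (next : Int)
    (k : List String) (v : Int) (h : d.get? k = some v) :
    (csPass1 tts items (d, n, next)).1.get? k = some v := by
  induction items generalizing d n next with
  | nil => simpa [csPass1] using h
  | cons item rest ih =>
    simp only [csPass1]
    cases hd : d.get? ((tts.get? item).getD []) with
    | some ni => exact ih d n next h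
    | none =>
      apply ih
      rw [PySem.Dict.get?_insert_of_ne]
      · exact h
      · intro hk; rw [hk] at h; rw [h] at hd; cases hd

-- A's one loop computes exactly what the stripped pass computes, plus pure-lookup rendering
theorem csLoopA_eq (tts : PySem.Dict String (List String)) (items : List String)
    (r n : List String) (d : PySem.Dict (List String) Int) (next : Int) :
    csLoopA tts items (r, n, d, next) =
      (r ++ items.map (fun item =>
          csRender item (((csPass1 tts items (d, n, next)).1.get? ((tts.get? item).getD [])).getD 0)),
       (csPass1 tts items (d, n, next)).2.1,
       (csPass1 tts items (d, n, next)).1,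
       (csPass1 tts items (d, n, next)).2.2) := by
  induction items generalizing r n d next with
  | nil => simp [csLoopA, csPass1]
  | cons item rest ih =>
    simp only [csLoopA, csPass1]
    cases hd : d.get? ((tts.get? item).getD []) with
    | some ni =>
      have hfin := csPass1_mono tts rest d n next _ _ hd
      simp [ih, hfin]
    | none =>
      have hself : (d.insert ((tts.get? item).getD []) next).get? ((tts.get? item).getD []) = some next :=
        PySem.Dict.get?_insert_self _ _ _
      have hfin := csPass1_mono tts rest (d.insert ((tts.get? item).getD []) next)
        (n ++ [csNote ((tts.get? item).getD []) next]) (next + 1) _ _ hself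
      simp [ih, hfin]

-- the stripped pass in batch form: enumerate the fresh keys from `next` and fold/map over them
theorem csPass1_batch (tts : PySem.Dict String (List String)) (items : List String)
    (d : PySem.Dict (List String) Int) (n : List String) (next : Int) :
    csPass1 tts items (d, n, next) =
      ((PySem.List.enumerate (csFresh tts d items) next).foldl (fun d' ik => d'.insert ik.2 ik.1) d,
       n ++ (PySem.List.enumerate (csFresh tts d items) next).map (fun ik => csNote ik.2 ik.1),
       next + (csFresh tts d items).length) := by
  induction items generalizing d n next with
  | nil => simp [csPass1, csFresh, PySem.List.enumerate_nil]
  | cons item rest ih =>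
    simp only [csPass1, csFresh]
    cases hd : d.get? ((tts.get? item).getD []) with
    | some ni => simp [ih]
    | none =>
      have hcongr : csFresh tts (d.insert ((tts.get? item).getD []) next) rest
          = csFresh tts (d.insert ((tts.get? item).getD []) 0) rest := by
        apply csFresh_congr
        intro k
        by_cases hk : k = (tts.get? item).getD []
        · simp [hk]
        · simp [PySem.Dict.get?_insert, hk]
      simp only [Option.isSome_none, Bool.false_eq_true, if_false, ih,
        PySem.List.enumerate_cons, hcongr, List.foldl_cons, List.map_cons,
        List.length_cons]
      refine Prod.ext rfl (Prod.ext ?_ ?_)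
      · simp
      · simp; ring
  
-- A's fresh-key stream is exactly "filter out already-indexed keys, then ordered dedup"
theorem csFresh_eq_dedup (tts : PySem.Dict String (List String)) (items : List String)
    (d0 : PySem.Dict (List String) Int) (d : PySem.Dict (List String) Int)
    (acc : List (List String))
    (h : ∀ k, (d.get? k).isSome = (d0.contains k || acc.contains k)) :
    acc ++ csFresh tts d items =
      ((items.map (fun item => (tts.get? item).getD [])).filter
          (fun k => !(d0.contains k))).foldl PySem.Set.add acc := by
  induction items generalizing d acc with
  | nil => simp [csFresh]
  | cons item rest ih =>
    simp only [csFresh, List.map_cons, List.filter_cons]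
    have hmem := h ((tts.get? item).getD [])
    by_cases h0 : d0.contains ((tts.get? item).getD []) = true
    · have hs : ((d.get? ((tts.get? item).getD [])).isSome) = true := by rw [hmem, h0]; simp
      simp only [hs, if_true, h0, Bool.not_true, Bool.false_eq_true, if_false]
      exact ih d acc h
    · replace h0 : d0.contains ((tts.get? item).getD []) = false := by simpa using h0
      by_cases ha : acc.contains ((tts.get? item).getD []) = true
      · have hs : ((d.get? ((tts.get? item).getD [])).isSome) = true := by rw [hmem, ha]; simp
        have ham : ((tts.get? item).getD []) ∈ acc := by simpa using ha
        have hadd : PySem.Set.add acc ((tts.get? item).getD []) = acc := by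
          simp [PySem.Set.add, ham]
        simp only [hs, h0, Bool.not_false, if_pos trivial, List.foldl_cons, hadd]
        exact ih d acc h
      · replace ha : acc.contains ((tts.get? item).getD []) = false := by simpa using ha
        have hs : ((d.get? ((tts.get? item).getD [])).isSome) = false := by
          rw [hmem, ha, h0]; rfl
        have hna : ¬ ((tts.get? item).getD []) ∈ acc := by simpa using ha
        have hadd : PySem.Set.add acc ((tts.get? item).getD []) = acc ++ [(tts.get? item).getD []] := by
          simp [PySem.Set.add, hna]
        simp only [hs, Bool.false_eq_true, if_false, h0, Bool.not_false, if_pos trivial,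
          List.foldl_cons, hadd]
        rw [← ih (d.insert ((tts.get? item).getD []) 0) (acc ++ [(tts.get? item).getD []]) ?_]
        · simp
        · intro j
          by_cases hj : j = (tts.get? item).getD []
          · subst hj
            simp
          · simp only [PySem.Dict.get?_insert, if_neg hj, h j, List.contains_append]
            cases hja : acc.contains j <;> simp_all

-- shifting the start of an enumeration
theorem enumerate_shift {α : Type} (xs : List α) (a b : Int) :
    PySem.List.enumerate xs (a + b) =
      (PySem.List.enumerate xs b).map (fun ik => (a + ik.1, ik.2)) := by
  induction xs generalizing b with
  | nil => simp [PySem.List.enumerate_nil]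
  | cons x t ih =>
    simp only [PySem.List.enumerate_cons, List.map_cons]
    rw [show a + b + 1 = a + (b + 1) by ring, ih]

theorem zip_map_self {α β γ : Type} (l : List α) (f : α → β) (g : α × β → γ) :
    (l.zip (l.map f)).map g = l.map (fun x => g (x, f x)) := by
  induction l with
  | nil => rfl
  | cons x t ih => simp [ih]

-- ===== VERDICT (by name: the statement is the Claim_ definition above) =====
theorem citation_suffixes_py_spec : Claim_equal_citation_suffixes_py := by
  intro items tts_l sk_l start _
  unfold Spec_citation_suffixes_py citation_suffixes_py citation_suffixes_py_alt
  have hfresh : csFresh (PySem.Dict.mk tts_l) (PySem.Dict.mk sk_l) items =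
      PySem.List.dedup ((items.map (fun item => ((PySem.Dict.mk tts_l).get? item).getD [])).filter
        (fun k => !((PySem.Dict.mk sk_l).contains k))) := by
    have := csFresh_eq_dedup (PySem.Dict.mk tts_l) items (PySem.Dict.mk sk_l) (PySem.Dict.mk sk_l) []
      (by intro k
          cases hg : (PySem.Dict.mk sk_l).get? k with
          | none =>
            have hc := (PySem.Dict.get?_eq_none_iff_contains (PySem.Dict.mk sk_l) k).mp hg
            simp [hc]
          | some v =>
            cases hc : (PySem.Dict.mk sk_l).contains k with
            | false =>
              rw [(PySem.Dict.get?_eq_none_iff_contains (PySem.Dict.mk sk_l) k).mpr hc] at hg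
              cases hg
            | true => simp)
    simpa [PySem.List.dedup_eq_ofList, PySem.Set.ofList_eq_foldl] using this
  cases items with
  | nil =>
    simp [csFresh, PySem.List.enumerate_nil] at hfresh ⊢
  | cons item rest =>
    simp only [reduceCtorEq, if_false]
    rw [csLoopA_eq, csPass1_batch, ← hfresh]
    rw [show (start : Int) = start + 0 by ring, enumerate_shift, zip_map_self]
    simp [List.foldl_map, Prod.ext_iff]
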